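-- pv_equiv track=rewrite | github.com/dStensland/LostCity | crawlers/sources/sealife_georgia.py | _infer_tags
-- ===== SOURCE A (Python) =====
-- BASE_TAGS = [
--     "family-friendly",
--     "all-ages",
--     "kids",
--     "educational",
--     "ticketed",
-- ]
--
-- def _infer_tags(title: str, description: str) -> list[str]:
--     """Append event-specific tags based on keywords."""
--     tags = list(BASE_TAGS)
--     combined = f"{title} {description}".lower()
--
--     if any(k in combined for k in ["spring break", "spring"]):
--         tags.append("seasonal")
--     if any(k in combined for k in ["halloween", "spooky", "ghost"]):
--         tags.extend(["seasonal", "holiday"])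
--     if any(k in combined for k in ["christmas", "holiday", "winter", "snow"]):
--         tags.extend(["seasonal", "holiday"])
--     if any(k in combined for k in ["behind the scenes", "tour"]):
--         tags.extend(["hands-on", "educational"])
--     if any(k in combined for k in ["toddler", "preschool", "little one"]):
--         tags.append("toddler")
--     if "sleepover" in combined or "sleep under" in combined:
--         tags.append("kids")
--     if "scout" in combined:
--         tags.append("educational")
--
--     seen: set = set()
--     unique = []
--     for t in tags:
--         if t not in seen:
--             seen.add(t)
--             unique.append(t)
--     return unique
-- ===== SOURCE B (Python) =====
-- BASE_TAGS = [
--     "family-friendly",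
--     "all-ages",
--     "kids",
--     "educational",
--     "ticketed",
-- ]
--
--
-- def _infer_tags(title: str, description: str) -> list[str]:
--     """Closed-form: the output of the build-and-dedup process is always BASE_TAGS
--     followed by the first occurrences of the possible new tags in the fixed order
--     seasonal, holiday, hands-on, toddler ("kids"/"educational" appends are always
--     duplicates of BASE_TAGS, and "seasonal" always precedes "holiday").  So compute
--     five boolean keyword features and filter a fixed candidate list; no tag list is
--     built up and no dedup pass is needed."""
--     combined = f"{title} {description}".lower()
--     springy = any(k in combined for k in ["spring break", "spring"])
--     spooky = any(k in combined for k in ["halloween", "spooky", "ghost"])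
--     wintry = any(k in combined for k in ["christmas", "holiday", "winter", "snow"])
--     toury = any(k in combined for k in ["behind the scenes", "tour"])
--     toddlery = any(k in combined for k in ["toddler", "preschool", "little one"])
--     extras = [
--         ("seasonal", springy or spooky or wintry),
--         ("holiday", spooky or wintry),
--         ("hands-on", toury),
--         ("toddler", toddlery),
--     ]
--     return BASE_TAGS + [t for t, cond in extras if cond]
-- ===== Notes on version B (the rewrite author's own statement) =====
-- stated objective: simpler
-- what changed: Instead of appending tags per keyword branch and deduplicating with a seen-set, B computes five boolean keyword features and returns BASE_TAGS plus a filter of the fixed candidate list [seasonal, holiday, hands-on, toddler], using the facts that appended kids/educational are always duplicates of BASE_TAGS and that seasonal always first-occurs before holiday; no tag accumulation or dedup pass exists in B.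
import Mathlib
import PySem

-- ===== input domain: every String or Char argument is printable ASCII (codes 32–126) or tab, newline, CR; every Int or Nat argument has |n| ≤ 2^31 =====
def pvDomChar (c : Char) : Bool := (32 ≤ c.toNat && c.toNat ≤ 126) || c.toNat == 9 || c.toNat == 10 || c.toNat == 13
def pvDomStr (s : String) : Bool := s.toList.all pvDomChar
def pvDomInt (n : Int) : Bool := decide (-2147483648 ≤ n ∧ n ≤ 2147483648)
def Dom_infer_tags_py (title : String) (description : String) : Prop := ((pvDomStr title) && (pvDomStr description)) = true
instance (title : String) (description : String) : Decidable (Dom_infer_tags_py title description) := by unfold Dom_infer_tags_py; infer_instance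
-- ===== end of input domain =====

-- B replaces A's build-then-dedup (append per branch, then a seen-set pass) by a closed form:
-- five boolean keyword features and a filter of a fixed candidate list (objective: simpler).

-- ===== PORT A =====
def pvBaseTags : List String :=
  ["family-friendly", "all-ages", "kids", "educational", "ticketed"]

-- 'if t not in seen: seen.add(t); unique.append(t)' — the body of A's dedup loop
def pvDedupStep (st : PySem.Set String × List String) (t : String) : PySem.Set String × List String :=
  if !(PySem.Set.contains st.1 t) then (PySem.Set.add st.1 t, st.2 ++ [t]) else st

def infer_tags_py (title : String) (description : String) : List String :=
  let tags := pvBaseTags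
  let combined := PySem.Chars.lower (title.toList ++ ' ' :: description.toList)
  let tags := if ["spring break", "spring"].any (fun k => PySem.Chars.isIn k.toList combined) then
    tags ++ ["seasonal"] else tags
  let tags := if ["halloween", "spooky", "ghost"].any (fun k => PySem.Chars.isIn k.toList combined) then
    tags ++ ["seasonal", "holiday"] else tags
  let tags := if ["christmas", "holiday", "winter", "snow"].any (fun k => PySem.Chars.isIn k.toList combined) then
    tags ++ ["seasonal", "holiday"] else tags
  let tags := if ["behind the scenes", "tour"].any (fun k => PySem.Chars.isIn k.toList combined) then
    tags ++ ["hands-on", "educational"] else tags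
  let tags := if ["toddler", "preschool", "little one"].any (fun k => PySem.Chars.isIn k.toList combined) then
    tags ++ ["toddler"] else tags
  let tags := if PySem.Chars.isIn "sleepover".toList combined || PySem.Chars.isIn "sleep under".toList combined then
    tags ++ ["kids"] else tags
  let tags := if PySem.Chars.isIn "scout".toList combined then tags ++ ["educational"] else tags
  (tags.foldl pvDedupStep (PySem.Set.empty, [])).2

-- ===== PORT B =====
def infer_tags_py_alt (title : String) (description : String) : List String :=
  let combined := PySem.Chars.lower (title.toList ++ ' ' :: description.toList)
  let springy := ["spring break", "spring"].any (fun k => PySem.Chars.isIn k.toList combined)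
  let spooky := ["halloween", "spooky", "ghost"].any (fun k => PySem.Chars.isIn k.toList combined)
  let wintry := ["christmas", "holiday", "winter", "snow"].any (fun k => PySem.Chars.isIn k.toList combined)
  let toury := ["behind the scenes", "tour"].any (fun k => PySem.Chars.isIn k.toList combined)
  let toddlery := ["toddler", "preschool", "little one"].any (fun k => PySem.Chars.isIn k.toList combined)
  let extras : List (String × Bool) :=
    [("seasonal", springy || spooky || wintry),
     ("holiday", spooky || wintry),
     ("hands-on", toury),
     ("toddler", toddlery)]
  pvBaseTags ++ (extras.filter (fun p => p.2)).map (fun p => p.1)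

-- ===== PRECONDITION & SPEC =====
def Spec_infer_tags_py (title : String) (description : String) (out : List String) : Prop := out = infer_tags_py_alt title description
instance (title : String) (description : String) (out : List String) : Decidable (Spec_infer_tags_py title description out) := by unfold Spec_infer_tags_py; infer_instance

-- ===== CLAIM (what is proved, stated in full; the proofs are below) =====
def Claim_equal_infer_tags_py : Prop := ∀ (title : String) (description : String), Dom_infer_tags_py title description → Spec_infer_tags_py title description (infer_tags_py title description)

-- ===== LEMMAS AND PROOFS =====

-- ===== VERDICT (by name: the statement is the Claim_ definition above) =====
theorem infer_tags_py_spec : Claim_equal_infer_tags_py := by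
  intro title description _
  unfold Spec_infer_tags_py infer_tags_py infer_tags_py_alt
  simp only []
  generalize (["spring break", "spring"].any (fun k => PySem.Chars.isIn k.toList (PySem.Chars.lower (title.toList ++ ' ' :: description.toList)))) = b1
  generalize (["halloween", "spooky", "ghost"].any (fun k => PySem.Chars.isIn k.toList (PySem.Chars.lower (title.toList ++ ' ' :: description.toList)))) = b2
  generalize (["christmas", "holiday", "winter", "snow"].any (fun k => PySem.Chars.isIn k.toList (PySem.Chars.lower (title.toList ++ ' ' :: description.toList)))) = b3
  generalize (["behind the scenes", "tour"].any (fun k => PySem.Chars.isIn k.toList (PySem.Chars.lower (title.toList ++ ' ' :: description.toList)))) = b4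
  generalize (["toddler", "preschool", "little one"].any (fun k => PySem.Chars.isIn k.toList (PySem.Chars.lower (title.toList ++ ' ' :: description.toList)))) = b5
  generalize (PySem.Chars.isIn "sleepover".toList (PySem.Chars.lower (title.toList ++ ' ' :: description.toList)) || PySem.Chars.isIn "sleep under".toList (PySem.Chars.lower (title.toList ++ ' ' :: description.toList))) = b6
  generalize (PySem.Chars.isIn "scout".toList (PySem.Chars.lower (title.toList ++ ' ' :: description.toList))) = b7
  revert b1 b2 b3 b4 b5 b6 b7
  decide
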